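-- pv_equiv track=rewrite | github.com/jamesbroadhead/retorrent | retorrent/lib/retorrentlib/filenamer.py | remove_camelcase
-- ===== SOURCE A (Python) =====
-- def remove_camelcase(filename):
--     if len(filename) == 0:
--         return filename
--     outfilename = ""
--     old = filename[0]
--     outfilename += old
--     for curr in filename[1:]:
--         if old.islower() and curr.isupper():
--             outfilename += "."
--         old = curr
--         outfilename += curr
--     return outfilename
-- ===== SOURCE B (Python) =====
-- def remove_camelcase(filename):
--     segments = []
--     start = 0
--     for i in range(1, len(filename)):
--         if filename[i - 1].islower() and filename[i].isupper():
--             segments.append(filename[start:i])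
--             start = i
--     segments.append(filename[start:])
--     return '.'.join(segments)
-- ===== Notes on version B (the rewrite author's own statement) =====
-- stated objective: alternative
-- what changed: B replaces A's char-by-char accumulation with prev-char state by a two-phase split-and-join: one pass collects the camelCase segment boundaries/segments, then a dot-join assembles the result.
import Mathlib
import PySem

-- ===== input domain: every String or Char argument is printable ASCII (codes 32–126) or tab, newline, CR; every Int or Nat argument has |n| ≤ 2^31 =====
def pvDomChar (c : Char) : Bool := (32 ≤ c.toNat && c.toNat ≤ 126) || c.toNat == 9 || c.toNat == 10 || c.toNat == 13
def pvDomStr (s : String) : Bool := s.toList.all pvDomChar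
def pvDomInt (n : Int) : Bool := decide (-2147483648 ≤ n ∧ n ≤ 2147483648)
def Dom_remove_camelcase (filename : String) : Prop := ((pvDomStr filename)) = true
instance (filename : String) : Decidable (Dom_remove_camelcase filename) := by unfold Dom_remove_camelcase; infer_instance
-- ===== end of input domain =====

-- B replaces A's char-by-char output accumulation (prev-char state, dot glued in while copying)
-- by a two-phase shape: one pass collecting the camelCase segments, then '.'.join — objective: alternative decomposition.

-- ===== PORT A =====
-- A's loop state: (old, outfilename); one step of the 'for curr in filename[1:]' body
def pvStepA (st : Char × List Char) (curr : Char) : Char × List Char :=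
  (curr, st.2 ++ (if PySem.Chars.islower st.1 && PySem.Chars.isupper curr then ['.'] else []) ++ [curr])

def remove_camelcase (filename : String) : String :=
  match filename.toList with
  | [] => filename                      -- if len(filename) == 0: return filename
  | c0 :: rest =>                       -- old = filename[0]; outfilename = "" + old
    String.ofList (rest.foldl pvStepA (c0, [c0])).2

-- ===== PORT B =====
-- B's loop state: (segments, start); one step of the 'for i in range(1, len(filename))' body
def pvStepB (cs : List Char) (st : List (List Char) × Int) (i : Int) : List (List Char) × Int :=
  if PySem.Chars.islower (PySem.List.pyGetD cs (i - 1) ' ') &&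
     PySem.Chars.isupper (PySem.List.pyGetD cs i ' ')       -- indices 1 ≤ i < len are in range, default unused
  then (st.1 ++ [PySem.List.slice cs (some st.2) (some i)], i)
  else st

def remove_camelcase_alt (filename : String) : String :=
  let cs := filename.toList
  let st := (PySem.List.pyRange 1 (PySem.Chars.len cs) 1).foldl (pvStepB cs) ([], 0)
  String.ofList (PySem.Chars.join ['.'] (st.1 ++ [PySem.List.slice cs (some st.2) none]))

-- ===== PRECONDITION & SPEC =====
def Spec_remove_camelcase (filename : String) (out : String) : Prop := out = remove_camelcase_alt filename
instance (filename : String) (out : String) : Decidable (Spec_remove_camelcase filename out) := by unfold Spec_remove_camelcase; infer_instance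

-- ===== CLAIM (what is proved, stated in full; the proofs are below) =====
def Claim_equal_remove_camelcase : Prop := ∀ (filename : String), Dom_remove_camelcase filename → Spec_remove_camelcase filename (remove_camelcase filename)

-- ===== LEMMAS AND PROOFS =====

-- what one step of A appends for the pair (old, c)
def pvRcStep (old c : Char) : List Char :=
  (if PySem.Chars.islower old && PySem.Chars.isupper c then ['.'] else []) ++ [c]

-- A's output past the first char, as structural recursion over the tail
def pvRc (old : Char) : List Char → List Char
  | [] => []
  | c :: cs => pvRcStep old c ++ pvRc c cs

-- A's whole output on a char list
def pvCamel : List Char → List Char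
  | [] => []
  | c :: cs => c :: pvRc c cs

theorem pvGetLastD_cons (c : Char) (cs : List Char) (d : Char) :
    (c :: cs).getLastD d = cs.getLastD c := by
  cases cs with
  | nil => simp
  | cons x t =>
      cases htl : (x :: t).getLast? with
      | none => exact absurd htl (by simp)
      | some a => rfl

theorem pvFoldA (l : List Char) (old : Char) (out : List Char) :
    l.foldl pvStepA (old, out) = (l.getLastD old, out ++ pvRc old l) := by
  induction l generalizing old out with
  | nil => simp [pvRc]
  | cons c cs ih =>
      rw [List.foldl_cons, show pvStepA (old, out) c
          = (c, out ++ pvRcStep old c) from by simp [pvStepA, pvRcStep], ih,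
        pvGetLastD_cons]
      simp [pvRc]

theorem pvRc_snoc (old : Char) (xs : List Char) (c : Char) :
    pvRc old (xs ++ [c]) = pvRc old xs ++ pvRcStep (xs.getLastD old) c := by
  induction xs generalizing old with
  | nil => simp [pvRc]
  | cons x xs ih =>
      rw [List.cons_append, show pvRc old (x :: (xs ++ [c]))
          = pvRcStep old x ++ pvRc x (xs ++ [c]) from rfl, ih, pvGetLastD_cons]
      simp [pvRc]

theorem pvCamel_snoc (c0 : Char) (r : List Char) (c : Char) :
    pvCamel ((c0 :: r) ++ [c]) = pvCamel (c0 :: r) ++ pvRcStep ((c0 :: r).getLastD ' ') c := by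
  rw [pvGetLastD_cons, List.cons_append,
    show pvCamel (c0 :: (r ++ [c])) = c0 :: pvRc c0 (r ++ [c]) from rfl, pvRc_snoc]
  simp [pvCamel]

theorem pvJoin_snoc_append (sep : List Char) (xs : List (List Char)) (a y : List Char) :
    PySem.Chars.join sep (xs ++ [a ++ y]) = PySem.Chars.join sep (xs ++ [a]) ++ y := by
  induction xs with
  | nil => simp [PySem.Chars.join_singleton]
  | cons x xs ih =>
      cases xs with
      | nil =>
          simp only [List.nil_append, List.cons_append,
            PySem.Chars.join_cons_cons, PySem.Chars.join_singleton]
          simp [List.append_assoc]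
      | cons x' xs' =>
          simp only [List.cons_append, PySem.Chars.join_cons_cons] at *
          simp [ih]

theorem pvJoin_two (sep : List Char) (xs : List (List Char)) (a b : List Char) :
    PySem.Chars.join sep (xs ++ [a, b]) = PySem.Chars.join sep (xs ++ [a ++ sep ++ b]) := by
  induction xs with
  | nil =>
      simp only [List.nil_append, PySem.Chars.join_cons_cons, PySem.Chars.join_singleton]
  | cons x xs ih =>
      cases xs with
      | nil =>
          simp only [List.nil_append, List.cons_append,
            PySem.Chars.join_cons_cons, PySem.Chars.join_singleton]
      | cons x' xs' =>
          simp only [List.cons_append, PySem.Chars.join_cons_cons] at *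
          simp [ih]

theorem pvTake_getLastD (cs : List Char) (m : Nat) (hm : m < cs.length) (d : Char) :
    (cs.take (m + 1)).getLastD d = cs[m] := by
  rw [List.take_add_one, List.getElem?_eq_getElem hm]
  exact List.getLastD_concat

-- the B-fold invariant: after the first m boundary positions, joining the collected
-- segments with the still-open tail reproduces A's output on the processed prefix
theorem pvFoldB_inv (c0 : Char) (r : List Char) (m : Nat)
    (hm : m + 1 ≤ (c0 :: r).length) :
    ∃ s : Nat,
      (List.range m).foldl (fun st (k : Nat) => pvStepB (c0 :: r) st (1 + (k : Int))) ([], 0)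
        = (((List.range m).foldl (fun st (k : Nat) => pvStepB (c0 :: r) st (1 + (k : Int))) ([], 0)).1, (s : Int)) ∧
      s ≤ m ∧
      PySem.Chars.join ['.']
        (((List.range m).foldl (fun st (k : Nat) => pvStepB (c0 :: r) st (1 + (k : Int))) ([], 0)).1
          ++ [(c0 :: r).drop s])
        = pvCamel ((c0 :: r).take (m + 1)) ++ (c0 :: r).drop (m + 1) := by
  set cs := c0 :: r with hcs
  induction m with
  | zero =>
      refine ⟨0, by simp, le_refl _, ?_⟩
      simp [PySem.Chars.join_singleton, pvCamel, hcs, pvRc]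
  | succ m ih =>
      have hm' : m + 1 ≤ cs.length := by omega
      obtain ⟨s, hst, hsm, hjoin⟩ := ih hm'
      have hmlt : m + 1 < cs.length := by omega
      have hmlt0 : m < cs.length := by omega
      set segs := ((List.range m).foldl (fun st (k : Nat) => pvStepB cs st (1 + (k : Int))) ([], 0)).1 with hsegs
      -- unfold one step of the fold
      rw [List.range_succ, List.foldl_append, List.foldl_cons, List.foldl_nil, hst]
      have hidx1 : (1 : Int) + (m : Int) - 1 = ((m : Nat) : Int) := by ring
      have hidx2 : (1 : Int) + (m : Int) = (((m + 1 : Nat)) : Int) := by push_cast; ring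
      have hget1 : PySem.List.pyGetD cs ((1 : Int) + (m : Int) - 1) ' ' = cs[m] := by
        rw [hidx1, PySem.List.pyGetD_natCast, List.getD_eq_getElem?_getD,
          List.getElem?_eq_getElem hmlt0]; rfl
      have hget2 : PySem.List.pyGetD cs ((1 : Int) + (m : Int)) ' ' = cs[m + 1] := by
        rw [hidx2, PySem.List.pyGetD_natCast, List.getD_eq_getElem?_getD,
          List.getElem?_eq_getElem hmlt]; rfl
      -- A's output grows by pvRcStep cs[m] cs[m+1]
      have htake : cs.take (m + 1 + 1) = cs.take (m + 1) ++ [cs[m + 1]] := by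
        rw [List.take_add_one, List.getElem?_eq_getElem hmlt]; rfl
      have hlastD : (cs.take (m + 1)).getLastD ' ' = cs[m] := pvTake_getLastD cs m hmlt0 ' '
      have h1 : cs.take (m + 1) = c0 :: r.take m := by rw [hcs]; rfl
      have hcamel : pvCamel (cs.take (m + 1 + 1))
          = pvCamel (cs.take (m + 1)) ++ pvRcStep cs[m] cs[m + 1] := by
        rw [htake, h1, pvCamel_snoc, ← h1, hlastD]
      have hdropm : cs.drop (m + 1) = cs[m + 1] :: cs.drop (m + 1 + 1) :=
        List.drop_eq_getElem_cons hmlt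
      unfold pvStepB
      rw [hget1, hget2]
      by_cases hb : PySem.Chars.islower cs[m] && PySem.Chars.isupper cs[m + 1]
      · -- boundary: segment closed at m+1, start moves
        rw [if_pos hb]
        refine ⟨m + 1, by simp [hidx2], by omega, ?_⟩
        simp only [hidx2]
        rw [PySem.List.slice_natCast]
        set X := List.take (m + 1 - s) (List.drop s cs) with hX
        have hsplit : cs.drop s = X ++ cs.drop (m + 1) := by
          have hdd : (cs.drop s).drop (m + 1 - s) = cs.drop (m + 1) := by
            rw [List.drop_drop]; congr 1; omega
          conv_lhs => rw [← List.take_append_drop (m + 1 - s) (cs.drop s)]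
          rw [hdd]
        have hjoinX : PySem.Chars.join ['.'] (segs ++ [X]) ++ cs.drop (m + 1)
            = pvCamel (cs.take (m + 1)) ++ cs.drop (m + 1) := by
          rw [← pvJoin_snoc_append, ← hsplit, hjoin]
        have hjX : PySem.Chars.join ['.'] (segs ++ [X]) = pvCamel (cs.take (m + 1)) :=
          List.append_cancel_right hjoinX
        calc PySem.Chars.join ['.'] ((segs ++ [X]) ++ [cs.drop (m + 1)])
            = PySem.Chars.join ['.'] (segs ++ [X, cs.drop (m + 1)]) := by simp
          _ = PySem.Chars.join ['.'] (segs ++ [X ++ ['.'] ++ cs.drop (m + 1)]) :=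
              pvJoin_two ['.'] segs X (cs.drop (m + 1))
          _ = PySem.Chars.join ['.'] (segs ++ [X]) ++ (['.'] ++ cs.drop (m + 1)) := by
              rw [List.append_assoc X, pvJoin_snoc_append]
          _ = pvCamel (cs.take (m + 1 + 1)) ++ cs.drop (m + 1 + 1) := by
              rw [hjX, hcamel, hdropm, pvRcStep, if_pos hb]; simp
      · -- no boundary: state unchanged
        rw [if_neg hb]
        refine ⟨s, rfl, by omega, ?_⟩
        rw [hjoin, hcamel, hdropm, pvRcStep, if_neg hb]
        simp

-- ===== VERDICT (by name: the statement is the Claim_ definition above) =====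
theorem remove_camelcase_spec : Claim_equal_remove_camelcase := by
  intro filename _
  unfold Spec_remove_camelcase remove_camelcase remove_camelcase_alt
  cases h : filename.toList with
  | nil =>
      have hf : filename = "" := by
        have := congrArg String.ofList h; simpa using this
      simp only [hf]
      decide
  | cons c0 r =>
      dsimp only
      have hlen : PySem.Chars.len (c0 :: r) = ((c0 :: r).length : Int) := by
        simp [PySem.Chars.len]
      have hnat : (((c0 :: r).length : Int) - 1).toNat = (c0 :: r).length - 1 := by
        omega
      rw [hlen, PySem.List.pyRange_one, hnat, List.foldl_map]
      obtain ⟨s, hst, hsm, hjoin⟩ := pvFoldB_inv c0 r ((c0 :: r).length - 1) (by simp)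
      have hm1 : (c0 :: r).length - 1 + 1 = (c0 :: r).length := by simp
      rw [hm1] at hjoin
      simp only [List.take_length, List.drop_length, List.append_nil] at hjoin
      rw [pvFoldA, hst, PySem.List.slice_from_natCast, hjoin]
      simp [pvCamel]
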